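-- pv_equiv track=rewrite | github.com/Tanishka07-hub/scheme_ai | content_filter.py | extract_scheme_content
-- ===== SOURCE A (Python) =====
-- def extract_scheme_content(raw_markdown):
--
--     # Words that indicate start of actual scheme content
--     start_keywords = [
--         "Scheme",
--         "Overview",
--         "About",
--         "Benefits",
--         "Eligibility",
--         "Application",
--         "Pradhan Mantri",
--         "PM-KISAN",
--         "PMAY",
--         "NREGA"
--     ]
--
--     # Words that indicate footer / junk section
--     end_keywords = [
--         "Privacy Policy",
--         "Terms and Conditions",
--         "Copyright",
--         "Contact Us",
--         "Follow Us",
--         "All rights reserved",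
--         "Site is designed",
--         "Last Updated"
--     ]
--
--     content = raw_markdown
--
--     # Find start position
--     start_positions = []
--
--     for word in start_keywords:
--         pos = content.find(word)
--         if pos != -1:
--             start_positions.append(pos)
--
--     if start_positions:
--         content = content[min(start_positions):]
--
--     # Remove footer
--     for word in end_keywords:
--         pos = content.find(word)
--         if pos != -1:
--             content = content[:pos]
--
--     # Limit size for AI
--     content = content[:20000]
--
--     return content
-- ===== SOURCE B (Python) =====
-- def extract_scheme_content(raw_markdown):
--     start_keywords = ["Scheme", "Overview", "About", "Benefits", "Eligibility",
--                       "Application", "Pradhan Mantri", "PM-KISAN", "PMAY", "NREGA"]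
--     end_keywords = ["Privacy Policy", "Terms and Conditions", "Copyright", "Contact Us",
--                     "Follow Us", "All rights reserved", "Site is designed", "Last Updated"]
--
--     def first_hit(text, keywords):
--         # scan the text position by position; return the first index where
--         # any of the keywords starts, or None if none ever matches
--         for i in range(len(text)):
--             if any(text.startswith(w, i) for w in keywords):
--                 return i
--         return None
--
--     h = first_hit(raw_markdown, start_keywords)
--     s = raw_markdown[h:] if h is not None else raw_markdown
--     e = first_hit(s, end_keywords)
--     body = s[:e] if e is not None else s
--     return body[:20000]
-- ===== Notes on version B (the rewrite author's own statement) =====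
-- stated objective: alternative
-- what changed: Instead of A's per-keyword str.find passes (accumulate start positions, then sequentially trim the text at each found footer), B scans the text position by position with a single first-match helper: the first index where any start keyword begins is the start cut and, on the remainder, the first index where any end keyword begins is the end cut.
import Mathlib
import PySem

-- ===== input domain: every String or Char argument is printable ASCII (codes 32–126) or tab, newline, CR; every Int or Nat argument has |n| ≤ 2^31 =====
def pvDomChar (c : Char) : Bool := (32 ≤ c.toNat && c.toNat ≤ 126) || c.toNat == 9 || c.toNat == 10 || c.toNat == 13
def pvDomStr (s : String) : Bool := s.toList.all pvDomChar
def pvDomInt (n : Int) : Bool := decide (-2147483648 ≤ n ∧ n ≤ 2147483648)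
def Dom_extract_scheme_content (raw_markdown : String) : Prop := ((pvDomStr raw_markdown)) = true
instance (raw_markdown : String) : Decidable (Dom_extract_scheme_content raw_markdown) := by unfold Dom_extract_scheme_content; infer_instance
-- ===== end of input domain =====

-- B replaces A's per-keyword find passes (accumulate start positions, sequentially trim footers)
-- by a position-by-position scan for the first index where any keyword starts (objective: alternative).

-- ===== PORT A =====
def extract_scheme_content (raw_markdown : String) : String :=
  let start_keywords : List String := ["Scheme", "Overview", "About", "Benefits", "Eligibility",
    "Application", "Pradhan Mantri", "PM-KISAN", "PMAY", "NREGA"]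
  let end_keywords : List String := ["Privacy Policy", "Terms and Conditions", "Copyright",
    "Contact Us", "Follow Us", "All rights reserved", "Site is designed", "Last Updated"]
  let content := raw_markdown
  -- start_positions accumulation loop
  let start_positions : List Int := start_keywords.foldl (fun acc word =>
      let pos := PySem.Str.find content word
      if pos ≠ -1 then acc ++ [pos] else acc) []
  -- content = content[min(start_positions):] when nonempty
  let content := if start_positions ≠ [] then
      PySem.Str.slice content (some (PySem.List.minD start_positions (fun x => x) 0)) none
    else content
  -- footer removal loop: content = content[:pos] for each found end keyword
  let content := end_keywords.foldl (fun content word =>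
      let pos := PySem.Str.find content word
      if pos ≠ -1 then PySem.Str.slice content none (some pos) else content) content
  PySem.Str.slice content none (some 20000)

-- ===== PORT B =====
-- first_hit(text, keywords): scan i = 0, 1, …, len(text)-1 and return the first i where some
-- keyword starts. Python's text.startswith(w, i) is ported as startswith on the slice text[i:],
-- which is exact for the 0 ≤ i < len(text) produced by the range loop.
def pvFirstHit (text : String) (keywords : List String) : Option Int :=
  (PySem.List.pyRange 0 (PySem.Str.len text) 1).find?
    (fun i => keywords.any (fun w => PySem.Str.startswith (PySem.Str.slice text (some i) none) w))

def extract_scheme_content_alt (raw_markdown : String) : String :=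
  let start_keywords : List String := ["Scheme", "Overview", "About", "Benefits", "Eligibility",
    "Application", "Pradhan Mantri", "PM-KISAN", "PMAY", "NREGA"]
  let end_keywords : List String := ["Privacy Policy", "Terms and Conditions", "Copyright",
    "Contact Us", "Follow Us", "All rights reserved", "Site is designed", "Last Updated"]
  let h := pvFirstHit raw_markdown start_keywords
  -- s = raw_markdown[h:] if h is not None else raw_markdown
  let s := h.elim raw_markdown (fun i => PySem.Str.slice raw_markdown (some i) none)
  let e := pvFirstHit s end_keywords
  -- body = s[:e] if e is not None else s
  let body := e.elim s (fun j => PySem.Str.slice s none (some j))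
  PySem.Str.slice body none (some 20000)

-- ===== PRECONDITION & SPEC =====
def Spec_extract_scheme_content (raw_markdown : String) (out : String) : Prop := out = extract_scheme_content_alt raw_markdown
instance (raw_markdown : String) (out : String) : Decidable (Spec_extract_scheme_content raw_markdown out) := by unfold Spec_extract_scheme_content; infer_instance

-- ===== CLAIM (what is proved, stated in full; the proofs are below) =====
def Claim_equal_extract_scheme_content : Prop := ∀ (raw_markdown : String), Dom_extract_scheme_content raw_markdown → Spec_extract_scheme_content raw_markdown (extract_scheme_content raw_markdown)

-- ===== LEMMAS AND PROOFS =====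

-- ---- A-side: the two keyword loops compute a min-boundary slice ----

lemma pv_find_eq_of (l w : List Char) (p : Nat)
    (h1 : w <+: l.drop p) (h2 : ∀ i < p, ¬ w <+: l.drop i) :
    PySem.Chars.find l w = (p : Int) := by
  have hne : PySem.Chars.find l w ≠ -1 := by
    rw [PySem.Chars.find_ne_neg_one_iff]
    rw [← PySem.Chars.isIn_iff_infix, ← PySem.Chars.exists_prefix_drop_iff_isIn]
    exact ⟨p, h1⟩
  have h0 : 0 ≤ PySem.Chars.find l w := by
    have := PySem.Chars.neg_one_le_find l w; omega
  obtain ⟨hocc, hmin⟩ := PySem.Chars.find_spec h0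
  set t := (PySem.Chars.find l w).toNat with ht
  have : t = p := by
    rcases lt_trichotomy t p with h | h | h
    · exact absurd hocc (h2 t h)
    · exact h
    · exact absurd h1 (hmin p h)
  omega

lemma pv_find_take_none (l w : List Char) (c : Nat)
    (hf : PySem.Chars.find l w = -1) :
    PySem.Chars.find (l.take c) w = -1 := by
  rw [PySem.Chars.find_eq_neg_one_iff] at hf ⊢
  intro h
  exact hf (h.trans (List.take_prefix c l).isInfix)

lemma pv_find_take_fits (l w : List Char) (c : Nat)
    (hf : 0 ≤ PySem.Chars.find l w)
    (hfit : (PySem.Chars.find l w).toNat + w.length ≤ c) :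
    PySem.Chars.find (l.take c) w = PySem.Chars.find l w := by
  obtain ⟨hocc, hmin⟩ := PySem.Chars.find_spec hf
  set p := (PySem.Chars.find l w).toNat with hp
  have h1 : w <+: (l.take c).drop p := by
    rw [List.drop_take]
    rw [List.prefix_take_iff]
    refine ⟨hocc, ?_⟩
    omega
  have h2 : ∀ i < p, ¬ w <+: (l.take c).drop i := by
    intro i hi h
    rw [List.drop_take] at h
    exact hmin i hi (h.trans (List.take_prefix _ _))
  have := pv_find_eq_of (l.take c) w p h1 h2
  omega

lemma pv_find_take_cut (l w : List Char) (c : Nat)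
    (hf : 0 ≤ PySem.Chars.find l w)
    (hcut : c < (PySem.Chars.find l w).toNat + w.length) :
    PySem.Chars.find (l.take c) w = -1 := by
  obtain ⟨hocc, hmin⟩ := PySem.Chars.find_spec hf
  set p := (PySem.Chars.find l w).toNat with hp
  rcases eq_or_ne w [] with hw | hw
  · subst hw
    have h0 := PySem.Chars.find_nil l
    simp at hcut
    omega
  have hwl : 0 < w.length := List.length_pos_of_ne_nil hw
  rw [PySem.Chars.find_eq_neg_one_iff]
  intro h
  rw [← PySem.Chars.isIn_iff_infix, ← PySem.Chars.exists_prefix_drop_iff_isIn] at h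
  obtain ⟨j, hj⟩ := h
  rw [List.drop_take, List.prefix_take_iff] at hj
  obtain ⟨hj1, hj2⟩ := hj
  by_cases hjp : j < p
  · exact hmin j hjp hj1
  · omega

def pvCutOf (l w : List Char) : Nat :=
  if PySem.Chars.find l w = -1 then l.length else (PySem.Chars.find l w).toNat

def pvOverlapOK (w1 w2 : List Char) : Bool :=
  (List.range w2.length).all (fun d =>
    d == 0 || !((w2.drop d).isPrefixOf w1 || w1.isPrefixOf (w2.drop d)))

lemma pv_no_straddle (w1 w2 l : List Char) (p q : Nat)
    (hok : pvOverlapOK w1 w2 = true)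
    (h2 : w2 <+: l.drop p) (h1 : w1 <+: l.drop q)
    (hpq : p < q) (hq : q < p + w2.length) : False := by
  have hd2 : (w2.drop (q - p)) <+: l.drop q := by
    have := h2.drop (q - p)
    rwa [List.drop_drop, show p + (q - p) = q by omega] at this
  have hcomp := List.prefix_or_prefix_of_prefix hd2 h1
  have hdlt : q - p < w2.length := by omega
  have := List.all_eq_true.mp hok (q - p) (List.mem_range.mpr hdlt)
  simp only [Bool.or_eq_true, beq_iff_eq, Bool.not_eq_true', Bool.or_eq_false_iff] at this
  rcases this with h | ⟨ha, hb⟩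
  · omega
  · rcases hcomp with h | h
    · rw [← List.isPrefixOf_iff_prefix] at h
      simp [h] at ha
    · rw [← List.isPrefixOf_iff_prefix] at h
      simp [h] at hb

lemma pv_end_fold (E : List (List Char)) (l : List Char)
    (hno : ∀ w1 ∈ E, ∀ w2 ∈ E, pvOverlapOK w1 w2 = true) :
    ∀ (K : List (List Char)), (∀ w ∈ K, w ∈ E) →
    ∀ (c : Nat), c ≤ l.length →
    (c = l.length ∨ ∃ w' ∈ E, w' <+: l.drop c) →
    K.foldl (fun m w =>
        let pos := PySem.Chars.find m w
        if pos ≠ -1 then PySem.Chars.slice m none (some pos) else m) (l.take c)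
      = l.take (K.foldl (fun c w => min c (pvCutOf l w)) c) := by
  intro K
  induction K with
  | nil => intro _ c _ _; simp
  | cons w K ih =>
    intro hK c hc hinv
    have hwE : w ∈ E := hK w List.mem_cons_self
    have hK' : ∀ v ∈ K, v ∈ E := fun v hv => hK v (List.mem_cons_of_mem w hv)
    simp only [List.foldl_cons]
    by_cases hf : PySem.Chars.find l w = -1
    · -- keyword absent from l
      have ht := pv_find_take_none l w c hf
      have hcut : pvCutOf l w = l.length := by simp [pvCutOf, hf]
      rw [hcut]
      have hmin : min c l.length = c := by omega
      simp only [ht, ne_eq, not_true_eq_false, if_false, hmin]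
      exact ih hK' c hc hinv
    · have h0 : 0 ≤ PySem.Chars.find l w := by
        have := PySem.Chars.neg_one_le_find l w; omega
      obtain ⟨hocc, hmin⟩ := PySem.Chars.find_spec h0
      have hcut : pvCutOf l w = (PySem.Chars.find l w).toNat := by simp [pvCutOf, hf]
      set p := (PySem.Chars.find l w).toNat with hp
      have hple : p + w.length ≤ l.length := by
        have h1 := hocc.length_le
        rw [List.length_drop] at h1
        have : p ≤ l.length := by
          have := PySem.Chars.find_le_length l w; omega
        omega
      by_cases hfit : p + w.length ≤ c
      · -- found within the current cut: trim to p
        have ht := pv_find_take_fits l w c h0 hfit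
        rw [ht]
        have hne' : PySem.Chars.find l w ≠ -1 := hf
        simp only [hne', ne_eq, not_false_eq_true, if_true]
        rw [PySem.Chars.slice_eq_listSlice, PySem.List.slice_to _ h0, List.take_take, ← hp]
        have hpc : min p c = p := by omega
        rw [hpc, hcut]
        have hmc : min c p = p := by omega
        rw [hmc]
        exact ih hK' p (by omega) (Or.inr ⟨w, hwE, hocc⟩)
      · -- first occurrence does not fit under the cut: c ≤ p (no straddle)
        have hcp : c ≤ p := by
          by_contra hlt
          have hlt : p < c := by omega
          rcases hinv with hlen | ⟨w', hw'E, hw'⟩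
          · omega
          · exact pv_no_straddle w' w l p c (hno w' hw'E w hwE) hocc hw' hlt (by omega)
        have ht := pv_find_take_cut l w c h0 (by omega)
        rw [hcut]
        have hmc : min c p = c := by omega
        simp only [ht, ne_eq, not_true_eq_false, if_false, hmc]
        exact ih hK' c hc hinv

lemma pv_endfold_toList (K : List String) (s : String) :
    (K.foldl (fun content word =>
        if PySem.Str.find content word ≠ -1 then
          PySem.Str.slice content none (some (PySem.Str.find content word)) else content) s).toList
    = (K.map String.toList).foldl (fun m w =>
        if PySem.Chars.find m w ≠ -1 then
          PySem.Chars.slice m none (some (PySem.Chars.find m w)) else m) s.toList := by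
  induction K generalizing s with
  | nil => simp
  | cons w K ih =>
    simp only [List.foldl_cons, List.map_cons]
    rw [ih]
    congr 1
    rw [PySem.Str.find_eq]
    by_cases h : PySem.Chars.find s.toList w.toList = -1
    · simp [h]
    · simp [h, PySem.Str.toList_slice, PySem.Chars.slice_eq_listSlice]

lemma pv_intmin (F : List Int) : ∀ a : Int, 0 ≤ a → (∀ p ∈ F, 0 ≤ p) →
    0 ≤ F.foldl min a ∧ (F.foldl min a).toNat = F.foldl (fun c p => min c p.toNat) a.toNat := by
  induction F with
  | nil => intro a ha _; simpa using ha
  | cons x t ih =>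
    intro a ha hall
    have hx : 0 ≤ x := hall x List.mem_cons_self
    have hall' : ∀ p ∈ t, 0 ≤ p := fun p hp => hall p (List.mem_cons_of_mem x hp)
    have hmin : 0 ≤ min a x := le_min ha hx
    obtain ⟨h1, h2⟩ := ih (min a x) hmin hall'
    refine ⟨h1, ?_⟩
    simp only [List.foldl_cons]
    rw [h2]
    congr 1
    omega

lemma pv_cutfold (l : List Char) (E : List (List Char)) : ∀ (c : Nat), c ≤ l.length →
    E.foldl (fun c w => min c (pvCutOf l w)) c
    = ((E.map (fun w => PySem.Chars.find l w)).filter (fun p => decide (p ≠ -1))).foldl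
        (fun a p => min a p.toNat) c := by
  induction E with
  | nil => intro c _; simp
  | cons w E ih =>
    intro c hc
    simp only [List.foldl_cons, List.map_cons, List.filter_cons]
    by_cases h : PySem.Chars.find l w = -1
    · have hcut : pvCutOf l w = l.length := by simp [pvCutOf, h]
      have : min c l.length = c := by omega
      simp only [h, hcut, this]
      simpa using ih c hc
    · have hcut : pvCutOf l w = (PySem.Chars.find l w).toNat := by simp [pvCutOf, h]
      have hb : decide (PySem.Chars.find l w ≠ -1) = true := by simpa using h
      rw [hcut, hb]
      simp only [if_true, List.foldl_cons]
      exact ih _ (by omega)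

lemma pv_minD_fold (F : List Int) (n : Nat) (hall : ∀ p ∈ F, 0 ≤ p ∧ p ≤ (n : Int)) :
    0 ≤ PySem.List.minD F (fun x => x) (n : Int) ∧
    (PySem.List.minD F (fun x => x) (n : Int)).toNat
      = F.foldl (fun a p => min a p.toNat) n := by
  cases F with
  | nil =>
    have hn : PySem.List.min? ([] : List Int) (fun x => x) = none :=
      (PySem.List.min?_eq_none_iff _ _).mpr rfl
    simp [PySem.List.minD, hn]
  | cons x t =>
    have hx := hall x List.mem_cons_self
    have hall' : ∀ p ∈ t, 0 ≤ p := fun p hp => (hall p (List.mem_cons_of_mem x hp)).1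
    obtain ⟨h1, h2⟩ := pv_intmin t x hx.1 hall'
    rw [PySem.List.minD, PySem.List.min?_id_cons]
    simp only [Option.getD_some, List.foldl_cons]
    refine ⟨h1, ?_⟩
    rw [h2]
    congr 1
    omega

lemma pv_end_phase (K : List String) (s : String)
    (hno : ∀ w1 ∈ K.map String.toList, ∀ w2 ∈ K.map String.toList,
      pvOverlapOK w1 w2 = true) :
    K.foldl (fun content word =>
        if PySem.Str.find content word ≠ -1 then
          PySem.Str.slice content none (some (PySem.Str.find content word)) else content) s
    = PySem.Str.slice s none
        (some (PySem.List.minD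
          ((K.map (fun w => PySem.Str.find s w)).filter (fun p => decide (p ≠ -1)))
          (fun x => x) (PySem.Str.len s))) := by
  rw [← String.toList_inj, pv_endfold_toList]
  have hFeq : (K.map (fun w => PySem.Str.find s w))
      = (K.map String.toList).map (fun w => PySem.Chars.find s.toList w) := by
    rw [List.map_map]
    simp [PySem.Str.find_eq, Function.comp]
  have hall : ∀ p ∈ (K.map (fun w => PySem.Str.find s w)).filter (fun p => decide (p ≠ -1)),
      0 ≤ p ∧ p ≤ (s.toList.length : Int) := by
    intro p hp
    rw [hFeq] at hp
    obtain ⟨hp1, hp2⟩ := List.mem_filter.mp hp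
    obtain ⟨w, _, hw⟩ := List.mem_map.mp hp1
    constructor
    · have h1 := PySem.Chars.neg_one_le_find s.toList w
      have h2 : p ≠ -1 := by simpa using hp2
      omega
    · rw [← hw]; exact PySem.Chars.find_le_length s.toList w
  rw [PySem.Str.len_eq]
  obtain ⟨he0, heN⟩ := pv_minD_fold _ s.toList.length hall
  have hfold := pv_end_fold (K.map String.toList) s.toList hno (K.map String.toList)
    (fun w hw => hw) s.toList.length le_rfl (Or.inl rfl)
  rw [List.take_length] at hfold
  have hstep : (fun (m : List Char) (w : List Char) =>
      if PySem.Chars.find m w ≠ -1 then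
        PySem.Chars.slice m none (some (PySem.Chars.find m w)) else m)
      = (fun m w => let pos := PySem.Chars.find m w
          if pos ≠ -1 then PySem.Chars.slice m none (some pos) else m) := rfl
  rw [hstep, hfold]
  rw [PySem.Str.toList_slice, PySem.Chars.slice_eq_listSlice, PySem.List.slice_to _ he0, heN]
  rw [pv_cutfold s.toList (K.map String.toList) s.toList.length le_rfl, hFeq]

lemma pv_slice_zero (s : String) : PySem.Str.slice s (some 0) none = s := by
  rw [← String.toList_inj, PySem.Str.toList_slice, PySem.Chars.slice_eq_listSlice]
  simp

lemma pv_start_phase (K : List String) (raw : String) :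
    (if (K.foldl (fun acc word =>
          if PySem.Str.find raw word ≠ -1 then acc ++ [PySem.Str.find raw word] else acc)
          ([] : List Int)) ≠ [] then
        PySem.Str.slice raw
          (some (PySem.List.minD (K.foldl (fun acc word =>
            if PySem.Str.find raw word ≠ -1 then acc ++ [PySem.Str.find raw word] else acc)
            ([] : List Int)) (fun x => x) 0)) none
      else raw)
    = PySem.Str.slice raw
        (some (PySem.List.minD
          ((K.map (fun w => PySem.Str.find raw w)).filter (fun p => decide (p ≠ -1)))
          (fun x => x) 0)) none := by
  rw [PySem.List.foldl_append_ite (p := fun word => PySem.Str.find raw word ≠ -1)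
    (f := fun word => PySem.Str.find raw word), List.nil_append]
  rw [show ((K.map (fun w => PySem.Str.find raw w)).filter (fun p => decide (p ≠ -1)))
      = (K.filter (fun word => decide (PySem.Str.find raw word ≠ -1))).map
          (fun w => PySem.Str.find raw w) from List.filter_map]
  by_cases h : (K.filter (fun word => decide (PySem.Str.find raw word ≠ -1))).map
      (fun w => PySem.Str.find raw w) = []
  · have hmD : PySem.List.minD ((K.filter (fun word => decide (PySem.Str.find raw word ≠ -1))).map
        (fun w => PySem.Str.find raw w)) (fun x => x) (0 : Int) = 0 := by
      rw [h]
      have hn : PySem.List.min? ([] : List Int) (fun x => x) = none :=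
        (PySem.List.min?_eq_none_iff _ _).mpr rfl
      simp [PySem.List.minD, hn]
    rw [hmD]
    simp only [h, ne_eq, not_true_eq_false, if_false]
    exact (pv_slice_zero raw).symm
  · simp only [h, ne_eq, not_false_eq_true, if_true]

lemma pv_end_keywords_ok :
    ∀ w1 ∈ (["Privacy Policy", "Terms and Conditions", "Copyright", "Contact Us",
        "Follow Us", "All rights reserved", "Site is designed",
        "Last Updated"] : List String).map String.toList,
    ∀ w2 ∈ (["Privacy Policy", "Terms and Conditions", "Copyright", "Contact Us",
        "Follow Us", "All rights reserved", "Site is designed",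
        "Last Updated"] : List String).map String.toList,
    pvOverlapOK w1 w2 = true := by decide

-- ---- B-side: the position scan finds exactly the min-boundary ----

-- the scan predicate at a nonnegative index i holds iff some keyword starts at i
lemma pv_pred_iff (text : String) (K : List String) (i : Int) (hi : 0 ≤ i) :
    ((K.any (fun w => PySem.Str.startswith (PySem.Str.slice text (some i) none) w)) = true)
    ↔ ∃ w ∈ K, w.toList <+: text.toList.drop i.toNat := by
  rw [List.any_eq_true]
  constructor
  · rintro ⟨w, hw, hsw⟩
    refine ⟨w, hw, ?_⟩
    rw [PySem.Str.startswith_eq, PySem.Chars.startswith_iff, PySem.Str.toList_slice,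
      PySem.Chars.slice_eq_listSlice, PySem.List.slice_from _ hi] at hsw
    exact hsw
  · rintro ⟨w, hw, hpre⟩
    refine ⟨w, hw, ?_⟩
    rw [PySem.Str.startswith_eq, PySem.Chars.startswith_iff, PySem.Str.toList_slice,
      PySem.Chars.slice_eq_listSlice, PySem.List.slice_from _ hi]
    exact hpre

lemma pv_find?_pyRange_none (p : Int → Bool) (a b : Int)
    (h : ∀ j, a ≤ j → j < b → p j = false) :
    (PySem.List.pyRange a b 1).find? p = none := by
  rw [List.find?_eq_none]
  intro x hx
  obtain ⟨h1, h2⟩ := PySem.List.mem_pyRange_one.mp hx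
  simp [h x h1 h2]

lemma pv_find?_pyRange_some (p : Int → Bool) (b m : Int) :
    ∀ (k : Nat) (a : Int), (m - a).toNat = k → a ≤ m → m < b → p m = true →
    (∀ j, a ≤ j → j < m → p j = false) →
    (PySem.List.pyRange a b 1).find? p = some m := by
  intro k
  induction k with
  | zero =>
    intro a hk ham hmb hpm _
    have : a = m := by omega
    subst this
    rw [PySem.List.pyRange_one_cons (by omega), List.find?_cons_of_pos hpm]
  | succ k ih =>
    intro a hk ham hmb hpm hmin
    have halt : a < m := by omega
    rw [PySem.List.pyRange_one_cons (by omega), List.find?_cons_of_neg (by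
      simp [hmin a le_rfl halt])]
    exact ih (a + 1) (by omega) (by omega) hmb hpm (fun j hj1 hj2 => hmin j (by omega) hj2)

-- if no keyword is found anywhere, the scan returns None
lemma pv_firstHit_none (text : String) (K : List String)
    (hF : (K.map (fun w => PySem.Str.find text w)).filter (fun p => decide (p ≠ -1)) = []) :
    pvFirstHit text K = none := by
  have habs : ∀ w ∈ K, PySem.Chars.find text.toList w.toList = -1 := by
    intro w hw
    have := List.filter_eq_nil_iff.mp hF (PySem.Str.find text w)
      (List.mem_map.mpr ⟨w, hw, rfl⟩)
    rw [PySem.Str.find_eq] at this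
    simpa using this
  unfold pvFirstHit
  apply pv_find?_pyRange_none
  intro j hj0 hjb
  by_contra hb
  have hp : (K.any (fun w => PySem.Str.startswith (PySem.Str.slice text (some j) none) w)) = true := by
    cases heq : (K.any (fun w => PySem.Str.startswith (PySem.Str.slice text (some j) none) w)) with
    | false => exact absurd heq hb
    | true => rfl
  obtain ⟨w, hw, hpre⟩ := (pv_pred_iff text K j hj0).mp hp
  have := habs w hw
  rw [PySem.Chars.find_eq_neg_one_iff] at this
  rw [← PySem.Chars.isIn_iff_infix, ← PySem.Chars.exists_prefix_drop_iff_isIn] at this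
  exact this ⟨j.toNat, hpre⟩

-- if some keyword is found, the scan returns the minimum found position
lemma pv_firstHit_some (text : String) (K : List String)
    (hK : ∀ w ∈ K, w.toList ≠ []) (d : Int)
    (hF : (K.map (fun w => PySem.Str.find text w)).filter (fun p => decide (p ≠ -1)) ≠ []) :
    pvFirstHit text K
      = some (PySem.List.minD
          ((K.map (fun w => PySem.Str.find text w)).filter (fun p => decide (p ≠ -1)))
          (fun x => x) d) := by
  set F := (K.map (fun w => PySem.Str.find text w)).filter (fun p => decide (p ≠ -1)) with hFdef
  obtain ⟨m, hm⟩ : ∃ m, PySem.List.min? F (fun x => x) = some m := by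
    cases hmq : PySem.List.min? F (fun x => x) with
    | none => exact absurd ((PySem.List.min?_eq_none_iff _ _).mp hmq) hF
    | some m => exact ⟨m, rfl⟩
  have hminD : PySem.List.minD F (fun x => x) d = m := by
    rw [PySem.List.minD, hm, Option.getD_some]
  have hmmem := PySem.List.min?_mem hm
  have hmlb := PySem.List.min?_isMin hm
  -- facts about a member of F
  have hmemF : ∀ q ∈ F, ∃ w ∈ K, PySem.Chars.find text.toList w.toList = q ∧ q ≠ -1 := by
    intro q hq
    obtain ⟨hq1, hq2⟩ := List.mem_filter.mp hq
    obtain ⟨w, hw, hwq⟩ := List.mem_map.mp hq1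
    rw [PySem.Str.find_eq] at hwq
    exact ⟨w, hw, hwq, by simpa using hq2⟩
  obtain ⟨w, hw, hfind, hnem⟩ := hmemF m hmmem
  have h0 : (0:Int) ≤ m := by
    have := PySem.Chars.neg_one_le_find text.toList w.toList
    rw [hfind] at this; omega
  have hf0 : 0 ≤ PySem.Chars.find text.toList w.toList := by rw [hfind]; exact h0
  obtain ⟨hocc, -⟩ := PySem.Chars.find_spec hf0
  rw [hfind] at hocc
  have hwlen : 0 < w.toList.length := List.length_pos_of_ne_nil (hK w hw)
  have hmlt : m < (text.toList.length : Int) := by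
    have h1 := hocc.length_le
    rw [List.length_drop] at h1
    have h2 := PySem.Chars.find_le_length text.toList w.toList
    rw [hfind] at h2
    omega
  rw [hminD]
  unfold pvFirstHit
  rw [PySem.Str.len_eq]
  apply pv_find?_pyRange_some _ _ m (m - 0).toNat 0 rfl h0 hmlt
  · exact (pv_pred_iff text K m h0).mpr ⟨w, hw, hocc⟩
  · intro j hj0 hjm
    cases hx : (K.any (fun v => PySem.Str.startswith (PySem.Str.slice text (some j) none) v)) with
    | false => rfl
    | true =>
      exfalso
      obtain ⟨w', hw', hpre⟩ := (pv_pred_iff text K j hj0).mp hx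
      by_cases hfw : PySem.Chars.find text.toList w'.toList = -1
      · rw [PySem.Chars.find_eq_neg_one_iff, ← PySem.Chars.isIn_iff_infix,
          ← PySem.Chars.exists_prefix_drop_iff_isIn] at hfw
        exact hfw ⟨j.toNat, hpre⟩
      · have hq0 : 0 ≤ PySem.Chars.find text.toList w'.toList := by
          have := PySem.Chars.neg_one_le_find text.toList w'.toList
          omega
        obtain ⟨-, hqmin⟩ := PySem.Chars.find_spec hq0
        have hqF : PySem.Str.find text w' ∈ F := by
          rw [hFdef]
          refine List.mem_filter.mpr ⟨List.mem_map.mpr ⟨w', hw', rfl⟩, ?_⟩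
          simpa [PySem.Str.find_eq] using hfw
        have hmq : m ≤ PySem.Str.find text w' := hmlb _ hqF
        rw [PySem.Str.find_eq] at hmq
        exact hqmin j.toNat (by omega) hpre

lemma pv_scan_start (text : String) (K : List String) (hK : ∀ w ∈ K, w.toList ≠ []) :
    (pvFirstHit text K).elim text (fun i => PySem.Str.slice text (some i) none)
    = PySem.Str.slice text
        (some (PySem.List.minD
          ((K.map (fun w => PySem.Str.find text w)).filter (fun p => decide (p ≠ -1)))
          (fun x => x) 0)) none := by
  by_cases hF : (K.map (fun w => PySem.Str.find text w)).filter (fun p => decide (p ≠ -1)) = []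
  · rw [pv_firstHit_none text K hF, hF]
    have hn : PySem.List.min? ([] : List Int) (fun x => x) = none :=
      (PySem.List.min?_eq_none_iff _ _).mpr rfl
    rw [Option.elim_none]
    rw [show PySem.List.minD ([] : List Int) (fun x => x) (0 : Int) = 0 by
      simp [PySem.List.minD, hn]]
    exact (pv_slice_zero text).symm
  · rw [pv_firstHit_some text K hK 0 hF, Option.elim_some]

lemma pv_slice_len (s : String) :
    PySem.Str.slice s none (some (PySem.Str.len s)) = s := by
  rw [← String.toList_inj, PySem.Str.toList_slice, PySem.Chars.slice_eq_listSlice,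
    PySem.Str.len_eq, PySem.List.slice_to _ (by positivity)]
  simp

lemma pv_scan_end (text : String) (K : List String) (hK : ∀ w ∈ K, w.toList ≠ []) :
    (pvFirstHit text K).elim text (fun j => PySem.Str.slice text none (some j))
    = PySem.Str.slice text none
        (some (PySem.List.minD
          ((K.map (fun w => PySem.Str.find text w)).filter (fun p => decide (p ≠ -1)))
          (fun x => x) (PySem.Str.len text))) := by
  by_cases hF : (K.map (fun w => PySem.Str.find text w)).filter (fun p => decide (p ≠ -1)) = []
  · rw [pv_firstHit_none text K hF, hF]
    have hn : PySem.List.min? ([] : List Int) (fun x => x) = none :=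
      (PySem.List.min?_eq_none_iff _ _).mpr rfl
    rw [Option.elim_none]
    rw [show PySem.List.minD ([] : List Int) (fun x => x) (PySem.Str.len text)
        = PySem.Str.len text by simp [PySem.List.minD, hn]]
    exact (pv_slice_len text).symm
  · rw [pv_firstHit_some text K hK (PySem.Str.len text) hF, Option.elim_some]

lemma pv_start_keywords_ne :
    ∀ w ∈ (["Scheme", "Overview", "About", "Benefits", "Eligibility", "Application",
      "Pradhan Mantri", "PM-KISAN", "PMAY", "NREGA"] : List String), w.toList ≠ [] := by decide

lemma pv_end_keywords_ne :
    ∀ w ∈ (["Privacy Policy", "Terms and Conditions", "Copyright", "Contact Us",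
      "Follow Us", "All rights reserved", "Site is designed",
      "Last Updated"] : List String), w.toList ≠ [] := by decide

lemma pv_main (raw : String) : extract_scheme_content raw = extract_scheme_content_alt raw := by
  unfold extract_scheme_content extract_scheme_content_alt
  simp only []
  rw [pv_start_phase, pv_end_phase _ _ pv_end_keywords_ok]
  rw [pv_scan_start _ _ pv_start_keywords_ne, pv_scan_end _ _ pv_end_keywords_ne]

-- ===== VERDICT (by name: the statement is the Claim_ definition above) =====
theorem extract_scheme_content_spec : Claim_equal_extract_scheme_content := by
  intro raw _
  unfold Spec_extract_scheme_content
  exact pv_main raw
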